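-- pv_equiv track=rewrite | github.com/liamasman/advent-of-code-2024 | src/day_two.py | is_line_safe_part_two
-- ===== SOURCE A (Python) =====
-- from itertools import pairwise
--
-- def is_line_safe_part_one(line):
--     if len(line) < 2:
--         return True
--     return is_gradually_ascending(line) or is_gradually_descending(line)
--
-- def is_gradually_ascending(line):
--     for a, b in pairwise(line):
--         if a >= b:
--             return False
--         if b - a > 3:
--             return False
--     return True
--
-- def is_gradually_descending(line):
--     return is_gradually_ascending(line[::-1])
--
-- def is_line_safe_part_two(line):
--     if len(line) <= 2:
--         return True
--
--     if is_line_safe_part_one(line):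
--         return True
--
--     for i, level in enumerate(line):
--         line_copy = line.copy()
--         del line_copy[i]
--         if is_line_safe_part_one(line_copy):
--             return True
--     return False
-- ===== SOURCE B (Python) =====
-- def _asc0(l):
--     return all(a < b <= a + 3 for a, b in zip(l, l[1:]))
--
-- def _check(l):
--     # ascending-safe with at most one deletion: find first bad pair (i, i+1);
--     # any fixing deletion must remove index i or i+1
--     for i in range(len(l) - 1):
--         if not (l[i] < l[i + 1] <= l[i] + 3):
--             drop_left = (i == 0 or l[i - 1] < l[i + 1] <= l[i - 1] + 3) and _asc0(l[i + 1:])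
--             drop_right = _asc0([l[i]] + l[i + 2:])
--             return drop_left or drop_right
--     return True
--
-- def is_line_safe_part_two(line):
--     return _check(line) or _check(line[::-1])
-- ===== Notes on version B (the rewrite author's own statement) =====
-- stated objective: faster
-- what changed: A retries the full part-one check after deleting every index (quadratic); B scans once per direction, finds the first bad adjacent pair, and tests only the two deletions that can fix it.
import Mathlib
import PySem

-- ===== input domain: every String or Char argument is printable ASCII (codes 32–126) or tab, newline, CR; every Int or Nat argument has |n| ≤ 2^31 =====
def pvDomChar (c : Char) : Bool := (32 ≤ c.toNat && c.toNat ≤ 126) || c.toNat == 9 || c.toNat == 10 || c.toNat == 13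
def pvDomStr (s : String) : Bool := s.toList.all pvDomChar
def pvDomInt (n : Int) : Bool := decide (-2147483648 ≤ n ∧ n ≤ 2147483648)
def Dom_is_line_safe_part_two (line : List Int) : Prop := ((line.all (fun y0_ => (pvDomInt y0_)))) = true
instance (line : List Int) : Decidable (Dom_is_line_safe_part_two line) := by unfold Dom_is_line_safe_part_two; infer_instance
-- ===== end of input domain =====

-- B replaces A's try-every-deletion scan by locating the first bad adjacent pair and testing
-- only the two deletions that can fix it (objective: faster).

-- ===== PORT A =====
-- 'for a, b in pairwise(line)' with early returns → structural recursion on adjacent pairs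
def is_gradually_ascending : List Int → Bool
  | a :: b :: rest =>
      if a ≥ b then false
      else if b - a > 3 then false
      else is_gradually_ascending (b :: rest)
  | _ => true

-- line[::-1] is List.reverse (PySem.List.slice?_none_none_neg_one)
def is_gradually_descending (line : List Int) : Bool :=
  is_gradually_ascending line.reverse

def is_line_safe_part_one (line : List Int) : Bool :=
  if line.length < 2 then true
  else is_gradually_ascending line || is_gradually_descending line

def is_line_safe_part_two (line : List Int) : Bool :=
  if line.length ≤ 2 then true
  else if is_line_safe_part_one line then true
  else
    -- for i, _ in enumerate(line): 'del line_copy[i]' (i in range) = eraseIdx; return-True-on-hit = any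
    (List.range line.length).any (fun i => is_line_safe_part_one (line.eraseIdx i))

-- ===== PORT B =====
-- _asc0: all adjacent pairs satisfy a < b <= a + 3
def asc0 : List Int → Bool
  | a :: b :: rest => (a < b && b ≤ a + 3) && asc0 (b :: rest)
  | _ => true

-- the i-loop of _check, carrying the previous element l[i-1] (none while i = 0)
def checkGo : Option Int → List Int → Bool
  | p, a :: b :: rest =>
      if a < b && b ≤ a + 3 then checkGo (some a) (b :: rest)
      else
        -- first bad pair found: drop_left or drop_right
        ((match p with
          | none => true
          | some x => x < b && b ≤ x + 3) && asc0 (b :: rest))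
        || asc0 (a :: rest)
  | _, _ => true

def check (l : List Int) : Bool := checkGo none l

def is_line_safe_part_two_alt (line : List Int) : Bool :=
  check line || check line.reverse

-- ===== PRECONDITION & SPEC =====
def Spec_is_line_safe_part_two (line : List Int) (out : Bool) : Prop := out = is_line_safe_part_two_alt line
instance (line : List Int) (out : Bool) : Decidable (Spec_is_line_safe_part_two line out) := by unfold Spec_is_line_safe_part_two; infer_instance

-- ===== CLAIM (what is proved, stated in full; the proofs are below) =====
def Claim_equal_is_line_safe_part_two : Prop := ∀ (line : List Int), Dom_is_line_safe_part_two line → Spec_is_line_safe_part_two line (is_line_safe_part_two line)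

-- ===== LEMMAS AND PROOFS =====

-- A's pairwise scan computes the same predicate as B's asc0
lemma gradAsc_eq_asc0 : ∀ l : List Int, is_gradually_ascending l = asc0 l
  | [] => rfl
  | [_] => rfl
  | a :: b :: t => by
    rw [is_gradually_ascending, asc0, gradAsc_eq_asc0 (b :: t)]
    split_ifs with h1 h2
    · have h : ¬ (a < b) := by omega
      simp [h]
    · have h : ¬ (b ≤ a + 3) := by omega
      simp [h]
    · have h3 : a < b := by omega
      have h4 : b ≤ a + 3 := by omega
      simp [h3, h4]

-- the link between a prepended element and the head of a list
def linkOk (x : Int) : List Int → Prop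
  | [] => True
  | y :: _ => x < y ∧ y ≤ x + 3

lemma asc0_cons_iff (x : Int) (l : List Int) :
    asc0 (x :: l) = true ↔ linkOk x l ∧ asc0 l = true := by
  cases l with
  | nil => simp [asc0, linkOk]
  | cons y t => simp [asc0, linkOk, and_assoc]

-- core invariant of B's scan: with a good link from x to the head of l, checkGo (some x) l
-- decides "l is ascending-safe, or becomes so (seen from x) after one deletion"
lemma checkGo_some : ∀ (l : List Int) (x : Int), linkOk x l →
    (checkGo (some x) l = true ↔
      asc0 l = true ∨ ∃ i < l.length, asc0 (x :: l.eraseIdx i) = true) := by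
  intro l
  induction l with
  | nil => intro x _; simp [checkGo, asc0]
  | cons a l ih =>
    intro x hx
    match l with
    | [] =>
      simp [checkGo, asc0]
    | b :: t =>
      by_cases hab : a < b ∧ b ≤ a + 3
      · have hgo : checkGo (some x) (a :: b :: t) = checkGo (some a) (b :: t) := by
          simp [checkGo, hab.1, hab.2]
        rw [hgo, ih a (by simpa [linkOk] using hab)]
        constructor
        · rintro (h | ⟨i, hi, h⟩)
          · left
            rw [asc0_cons_iff]
            exact ⟨hab, h⟩
          · right
            refine ⟨i + 1, by simpa using Nat.succ_lt_succ hi, ?_⟩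
            rw [List.eraseIdx_cons_succ, asc0_cons_iff]
            exact ⟨hx, h⟩
        · rintro (h | ⟨i, hi, h⟩)
          · rw [asc0_cons_iff] at h
            exact Or.inl h.2
          · match i with
            | 0 =>
              rw [List.eraseIdx_cons_zero, asc0_cons_iff] at h
              exact Or.inl h.2
            | i + 1 =>
              rw [List.eraseIdx_cons_succ, asc0_cons_iff, asc0_cons_iff] at h
              exact Or.inr ⟨i, by simpa using Nat.lt_of_succ_lt_succ hi, by
                rw [asc0_cons_iff]; exact ⟨h.2.1, h.2.2⟩⟩
      · have hgo : checkGo (some x) (a :: b :: t) =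
            (((x < b && b ≤ x + 3) && asc0 (b :: t)) || asc0 (a :: t)) := by
          simp only [checkGo]
          rw [if_neg (by simpa [Bool.and_eq_true, decide_eq_true_eq] using hab)]
        rw [hgo]
        simp only [Bool.or_eq_true, Bool.and_eq_true, decide_eq_true_eq]
        constructor
        · rintro (⟨⟨h1, h2⟩, h3⟩ | h)
          · exact Or.inr ⟨0, by simp, by
              rw [List.eraseIdx_cons_zero, asc0_cons_iff]; exact ⟨⟨h1, h2⟩, h3⟩⟩
          · exact Or.inr ⟨1, by simp, by
              rw [List.eraseIdx_cons_succ, List.eraseIdx_cons_zero, asc0_cons_iff]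
              exact ⟨hx, h⟩⟩
        · rintro (h | ⟨i, hi, h⟩)
          · rw [asc0_cons_iff] at h
            exact absurd h.1 hab
          · match i with
            | 0 =>
              rw [List.eraseIdx_cons_zero, asc0_cons_iff] at h
              exact Or.inl ⟨h.1, h.2⟩
            | 1 =>
              rw [List.eraseIdx_cons_succ, List.eraseIdx_cons_zero, asc0_cons_iff] at h
              exact Or.inr h.2
            | i + 2 =>
              rw [List.eraseIdx_cons_succ, List.eraseIdx_cons_succ,
                asc0_cons_iff, asc0_cons_iff] at h
              exact absurd h.2.1 hab

-- top level: check decides "ascending-safe after deleting at most one element"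
lemma check_iff (l : List Int) :
    check l = true ↔ asc0 l = true ∨ ∃ i < l.length, asc0 (l.eraseIdx i) = true := by
  match l with
  | [] => simp [check, checkGo, asc0]
  | [a] => simp [check, checkGo, asc0]
  | a :: b :: t =>
    by_cases hab : a < b ∧ b ≤ a + 3
    · have hgo : check (a :: b :: t) = checkGo (some a) (b :: t) := by
        simp [check, checkGo, hab.1, hab.2]
      rw [hgo, checkGo_some (b :: t) a (by simpa [linkOk] using hab)]
      constructor
      · rintro (h | ⟨i, hi, h⟩)
        · left; rw [asc0_cons_iff]; exact ⟨hab, h⟩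
        · exact Or.inr ⟨i + 1, by simpa using Nat.succ_lt_succ hi, by
            rw [List.eraseIdx_cons_succ]; exact h⟩
      · rintro (h | ⟨i, hi, h⟩)
        · rw [asc0_cons_iff] at h
          exact Or.inl h.2
        · match i with
          | 0 =>
            rw [List.eraseIdx_cons_zero] at h
            exact Or.inl h
          | i + 1 =>
            rw [List.eraseIdx_cons_succ] at h
            exact Or.inr ⟨i, by simpa using Nat.lt_of_succ_lt_succ hi, h⟩
    · have hgo : check (a :: b :: t) = ((true && asc0 (b :: t)) || asc0 (a :: t)) := by
        simp only [check, checkGo]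
        rw [if_neg (by simpa [Bool.and_eq_true, decide_eq_true_eq] using hab)]
      rw [hgo]
      simp only [Bool.true_and, Bool.or_eq_true]
      constructor
      · rintro (h | h)
        · exact Or.inr ⟨0, by simp, by rw [List.eraseIdx_cons_zero]; exact h⟩
        · exact Or.inr ⟨1, by simp, by
            rw [List.eraseIdx_cons_succ, List.eraseIdx_cons_zero]; exact h⟩
      · rintro (h | ⟨i, hi, h⟩)
        · rw [asc0_cons_iff] at h
          exact absurd h.1 hab
        · match i with
          | 0 => exact Or.inl h
          | 1 => exact Or.inr h
          | i + 2 =>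
            rw [List.eraseIdx_cons_succ, List.eraseIdx_cons_succ, asc0_cons_iff] at h
            exact absurd h.1 hab

lemma reverse_eraseIdx (l : List Int) (i : ℕ) (hi : i < l.length) :
    (l.eraseIdx i).reverse = l.reverse.eraseIdx (l.length - 1 - i) := by
  rw [List.eraseIdx_eq_take_drop_succ, List.eraseIdx_eq_take_drop_succ,
    List.reverse_append, List.reverse_take, List.reverse_drop]
  have h1 : l.length - (i + 1) = l.length - 1 - i := by omega
  have h2 : l.length - i = l.length - 1 - i + 1 := by omega
  rw [h1, h2]

-- check is vacuously true on lists of length ≤ 2 (matching A's early exit)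
lemma check_short (l : List Int) (h : l.length ≤ 2) : check l = true := by
  match l with
  | [] => rfl
  | [a] => rfl
  | [a, b] =>
    simp only [check, checkGo]
    split
    · rfl
    · rfl
  | a :: b :: c :: t => simp at h

lemma part_one_iff (l : List Int) (h : 2 ≤ l.length) :
    is_line_safe_part_one l = (asc0 l || asc0 l.reverse) := by
  rw [is_line_safe_part_one, if_neg (by omega), is_gradually_descending,
    gradAsc_eq_asc0, gradAsc_eq_asc0]

theorem is_line_safe_part_two_spec : Claim_equal_is_line_safe_part_two := by
  intro line _
  unfold Spec_is_line_safe_part_two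
  by_cases hlen : line.length ≤ 2
  · rw [is_line_safe_part_two, if_pos hlen, is_line_safe_part_two_alt,
      check_short line hlen, Bool.true_or]
  · rw [Bool.eq_iff_iff]
    have hA : is_line_safe_part_two line = true ↔
        (asc0 line = true ∨ asc0 line.reverse = true) ∨
        ∃ i < line.length,
          asc0 (line.eraseIdx i) = true ∨ asc0 ((line.eraseIdx i).reverse) = true := by
      rw [is_line_safe_part_two, if_neg hlen]
      split
      · rename_i hp1
        rw [part_one_iff line (by omega)] at hp1
        simp only [Bool.or_eq_true] at hp1
        simp [hp1]
      · rename_i hp1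
        rw [part_one_iff line (by omega)] at hp1
        simp only [Bool.or_eq_true, not_or, Bool.not_eq_true] at hp1
        simp only [List.any_eq_true, List.mem_range]
        constructor
        · rintro ⟨i, hi, h⟩
          rw [part_one_iff _ (by rw [List.length_eraseIdx_of_lt hi]; omega),
            Bool.or_eq_true] at h
          exact Or.inr ⟨i, hi, h⟩
        · rintro (h | ⟨i, hi, h⟩)
          · rcases h with h | h
            · rw [hp1.1] at h; exact absurd h (by simp)
            · rw [hp1.2] at h; exact absurd h (by simp)
          · exact ⟨i, hi, by
              rw [part_one_iff _ (by rw [List.length_eraseIdx_of_lt hi]; omega),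
                Bool.or_eq_true]
              exact h⟩
    have hB : is_line_safe_part_two_alt line = true ↔
        (asc0 line = true ∨ ∃ i < line.length, asc0 (line.eraseIdx i) = true) ∨
        (asc0 line.reverse = true ∨
          ∃ i < line.length, asc0 (line.reverse.eraseIdx i) = true) := by
      rw [is_line_safe_part_two_alt, Bool.or_eq_true, check_iff, check_iff,
        List.length_reverse]
    rw [hA, hB]
    have hrev : (∃ i < line.length, asc0 ((line.eraseIdx i).reverse) = true) ↔
        ∃ i < line.length, asc0 (line.reverse.eraseIdx i) = true := by
      constructor
      · rintro ⟨i, hi, h⟩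
        exact ⟨line.length - 1 - i, by omega, by rw [← reverse_eraseIdx line i hi]; exact h⟩
      · rintro ⟨i, hi, h⟩
        refine ⟨line.length - 1 - i, by omega, ?_⟩
        rw [reverse_eraseIdx line _ (by omega)]
        have : line.length - 1 - (line.length - 1 - i) = i := by omega
        rw [this]
        exact h
    constructor
    · rintro ((h | h) | ⟨i, hi, h | h⟩)
      · exact Or.inl (Or.inl h)
      · exact Or.inr (Or.inl h)
      · exact Or.inl (Or.inr ⟨i, hi, h⟩)
      · exact Or.inr (Or.inr (hrev.mp ⟨i, hi, h⟩))
    · rintro ((h | ⟨i, hi, h⟩) | (h | h))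
      · exact Or.inl (Or.inl h)
      · exact Or.inr ⟨i, hi, Or.inl h⟩
      · exact Or.inl (Or.inr h)
      · obtain ⟨i, hi, h'⟩ := hrev.mpr h
        exact Or.inr ⟨i, hi, Or.inr h'⟩
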